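-- pv_equiv track=rewrite | github.com/StarSein/BaekJoon | 백준/Gold/2021. 최소 환승 경로/최소 환승 경로.py | solution
-- ===== SOURCE A (Python) =====
-- from collections import deque
-- from typing import List
--
-- def solution(N: int, L: int, lines: List[List[int]], S: int, E: int) -> int:
--     if S == E:
--         return 0
--
--     graph = [[] for _ in range(N + 1)]
--     for line_id, line in enumerate(lines):
--         line.pop(-1)
--         for node in line:
--             graph[node].append(line_id)
--
--     dq = deque([(0, S)])
--     visit = [False for _ in range(N + 1)]
--     line_visit = [False for _ in range(L)]
--     visit[S] = True
--     while dq: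
--         cur_cost, cur_node = dq.popleft()
--
--         for line_id in graph[cur_node]:
--             if line_visit[line_id]:
--                 continue
--             line_visit[line_id] = True
--             for nex_node in lines[line_id]:
--                 if visit[nex_node]:
--                     continue
--                 if nex_node == E:
--                     return cur_cost
--                 dq.append((cur_cost + 1, nex_node))
--                 visit[nex_node] = True
--
--     return -1
-- ===== SOURCE B (Python) =====
-- def solution(N, L, lines, S, E):
--     if S == E:
--         return 0
--     for line in lines:
--         line.pop(-1)
--     visited = set()
--     frontier = [i for i in range(len(lines)) if S in lines[i]]
--     visited.update(frontier)
--     k = 0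
--     while frontier:
--         if any(E in lines[i] for i in frontier):
--             return k
--         stations = set()
--         for i in frontier:
--             stations.update(lines[i])
--         frontier = [i for i in range(len(lines))
--                     if i not in visited and any(v in stations for v in lines[i])]
--         visited.update(frontier)
--         k += 1
--     return -1
-- ===== Notes on version B (the rewrite author's own statement) =====
-- stated objective: alternative
-- what changed: A runs a station-level BFS with a cost-tagged deque over a station->lines adjacency array; B instead does a level-synchronous BFS on the graph of LINES: it seeds the frontier with all lines containing S and repeatedly moves to the set of unvisited lines sharing a station with the current frontier, returning the first level whose frontier holds a line containing E (both perform the same line.pop(-1) mutation on the input).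
-- outside the precondition, e.g. on solution(1, 2, [[1, -1, 9], [-1, 0, 9]], 1, 0): A returns 0, B returns 1; on solution(1, 1, [[1, 0, 9]], -1, 0): A returns 0, B returns -1
import Mathlib
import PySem

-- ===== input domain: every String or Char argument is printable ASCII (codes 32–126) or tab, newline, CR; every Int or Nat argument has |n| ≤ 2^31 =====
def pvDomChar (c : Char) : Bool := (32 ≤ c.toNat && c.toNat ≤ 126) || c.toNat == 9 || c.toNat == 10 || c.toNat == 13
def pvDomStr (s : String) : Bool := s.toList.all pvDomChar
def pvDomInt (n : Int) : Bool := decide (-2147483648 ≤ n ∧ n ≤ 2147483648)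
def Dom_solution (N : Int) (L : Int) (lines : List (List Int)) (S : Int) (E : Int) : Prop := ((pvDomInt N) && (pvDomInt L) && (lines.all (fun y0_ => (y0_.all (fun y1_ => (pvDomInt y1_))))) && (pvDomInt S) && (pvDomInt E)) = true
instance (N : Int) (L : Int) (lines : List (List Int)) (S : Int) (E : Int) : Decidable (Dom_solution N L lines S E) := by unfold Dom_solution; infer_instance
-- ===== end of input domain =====

-- B replaces A's cost-tagged station BFS by a level-synchronous BFS over the graph of LINES
-- (objective: alternative decomposition, same observable behaviour; both note: the Python
-- versions mutate `lines` identically via line.pop(-1); the theorems are about the return value).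

-- counting-helper lemmas used by the ports' termination arguments
theorem pv_filter_le {α : Type} (p q : α → Bool) (l : List α)
    (h : ∀ x ∈ l, q x = true → p x = true) :
    (l.filter q).length ≤ (l.filter p).length := by
  induction l with
  | nil => simp
  | cons x xs ih =>
    have hx := h x (by simp)
    have ihs := ih (fun y hy => h y (by simp [hy]))
    by_cases hq : q x = true
    · simp [List.filter_cons, hq, hx hq]; omega
    · simp only [Bool.not_eq_true] at hq
      by_cases hp : p x = true <;> simp [List.filter_cons, hq, hp] <;> omega

theorem pv_filter_lt {α : Type} (p q : α → Bool) (l : List α)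
    (h : ∀ x ∈ l, q x = true → p x = true) (a : α) (ha : a ∈ l)
    (hpa : p a = true) (hqa : q a = false) :
    (l.filter q).length < (l.filter p).length := by
  induction l with
  | nil => simp at ha
  | cons x xs ih =>
    have hs : ∀ y ∈ xs, q y = true → p y = true := fun y hy => h y (by simp [hy])
    rcases List.mem_cons.1 ha with rfl | hmem
    · have hle := pv_filter_le p q xs hs
      simp [List.filter_cons, hpa, hqa]; omega
    · have hlt := ih hs hmem
      have hx := h x (by simp)
      by_cases hq : q x = true
      · simp [List.filter_cons, hq, hx hq]; omega
      · simp only [Bool.not_eq_true] at hq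
        by_cases hp : p x = true <;> simp [List.filter_cons, hq, hp] <;> omega

-- ===== PORT A =====
-- graph = [[] for _ in range(N+1)]; graph[node].append(line_id)
-- the index-array is ported as a function Int → List Nat with pointwise update
-- (exact under Pre_, where every station index is in range 0..N).
def pvGraph (stss : List (List Int)) : Int → List Nat :=
  stss.zipIdx.foldl
    (fun g p => p.1.foldl (fun g' x => fun w => if w = x then g' w ++ [p.2] else g' w) g)
    (fun _ => [])

-- the inner 'for nex_node in lines[line_id]' loop; `visit` is the set of stations with
-- visit[station] = True (exact under Pre_, where stations are in range).
def pvExpand (E c : Int) : List Int → List (Int × Int) → List Int →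
    Option Int × List (Int × Int) × List Int
  | [], dq, visit => (none, dq, visit)
  | v :: rest, dq, visit =>
    if v ∈ visit then pvExpand E c rest dq visit
    else if v = E then (some c, dq, visit)
    else pvExpand E c rest (dq ++ [(c + 1, v)]) (v :: visit)

-- the 'for line_id in graph[cur_node]' loop; `lv` is the set of line ids with line_visit = True.
def pvProcess (stss : List (List Int)) (E c : Int) : List Nat → List (Int × Int) → List Int →
    List Nat → Option Int × List (Int × Int) × List Int × List Nat
  | [], dq, visit, lv => (none, dq, visit, lv)
  | i :: rest, dq, visit, lv =>
    if i ∈ lv then pvProcess stss E c rest dq visit lv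
    else
      match pvExpand E c (stss.getD i []) dq visit with
      | (some r, dq', visit') => (some r, dq', visit', i :: lv)
      | (none, dq', visit') => pvProcess stss E c rest dq' visit' (i :: lv)

def pvCnt (stss : List (List Int)) (visit : List Int) : Nat :=
  ((stss.flatMap id).filter (fun w => decide (w ∉ visit))).length

theorem pvCnt_cons_lt (stss : List (List Int)) (visit : List Int) (v : Int)
    (hv : v ∈ stss.flatMap id) (hnv : v ∉ visit) :
    pvCnt stss (v :: visit) < pvCnt stss visit := by
  refine pv_filter_lt _ _ _ ?_ v hv (by simpa using hnv) (by simp)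
  intro x _ hx
  simp only [decide_eq_true_eq] at *
  intro hmem; exact hx (by simp [hmem])

theorem pv_sts_sub (stss : List (List Int)) (i : Nat) :
    ∀ v ∈ stss.getD i [], v ∈ stss.flatMap id := by
  intro v hv
  by_cases h : i < stss.length
  · rw [List.getD_eq_getElem stss [] h] at hv
    exact List.mem_flatMap.2 ⟨stss[i], List.getElem_mem h, hv⟩
  · rw [List.getD_eq_default stss [] (by omega)] at hv; simp at hv

theorem pvExpand_measure (stss : List (List Int)) (E c : Int) :
    ∀ (line : List Int) (dq : List (Int × Int)) (visit : List Int),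
    (∀ v ∈ line, v ∈ stss.flatMap id) →
    ((pvExpand E c line dq visit).2.1).length + pvCnt stss (pvExpand E c line dq visit).2.2 ≤
      dq.length + pvCnt stss visit := by
  intro line
  induction line with
  | nil => intro dq visit _; simp [pvExpand]
  | cons v rest ih =>
    intro dq visit hsub
    by_cases hv : v ∈ visit
    · simpa [pvExpand, hv] using ih dq visit (fun w hw => hsub w (by simp [hw]))
    · by_cases hE : v = E
      · subst hE; simp [pvExpand, hv]
      · have hlt := pvCnt_cons_lt stss visit v (hsub v (by simp)) hv
        have := ih (dq ++ [(c + 1, v)]) (v :: visit) (fun w hw => hsub w (by simp [hw]))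
        simp only [pvExpand, if_neg hv, if_neg hE]
        simp only [List.length_append, List.length_cons, List.length_nil] at this ⊢
        omega

theorem pvProcess_measure (stss : List (List Int)) (E c : Int) :
    ∀ (ids : List Nat) (dq : List (Int × Int)) (visit : List Int) (lv : List Nat),
    ((pvProcess stss E c ids dq visit lv).2.1).length +
      pvCnt stss (pvProcess stss E c ids dq visit lv).2.2.1 ≤
      dq.length + pvCnt stss visit := by
  intro ids
  induction ids with
  | nil => intro dq visit lv; simp [pvProcess]
  | cons i rest ih =>
    intro dq visit lv
    by_cases hi : i ∈ lv
    · simpa [pvProcess, hi] using ih dq visit lv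
    · have hexp := pvExpand_measure stss E c (stss.getD i []) dq visit (pv_sts_sub stss i)
      simp only [pvProcess, if_neg hi]
      rcases hres : pvExpand E c (stss.getD i []) dq visit with ⟨o, dq', visit'⟩
      rw [hres] at hexp
      cases o with
      | some r => simpa using hexp
      | none =>
        have := ih dq' visit' (i :: lv)
        simp only at hexp this ⊢
        omega

-- the main 'while dq:' loop
def pvALoop (stss : List (List Int)) (graph : Int → List Nat) (E : Int) :
    List (Int × Int) → List Int → List Nat → Int
  | [], _, _ => -1
  | (c, v) :: rest, visit, lv =>
    match h : pvProcess stss E c (graph v) rest visit lv with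
    | (some r, _, _, _) => r
    | (none, dq', visit', lv') => pvALoop stss graph E dq' visit' lv'
termination_by dq visit _ => dq.length + pvCnt stss visit
decreasing_by
  have hm := pvProcess_measure stss E c (graph v) rest visit lv
  rw [h] at hm
  simp only [List.length_cons] at hm ⊢
  omega

def solution (N : Int) (L : Int) (lines : List (List Int)) (S : Int) (E : Int) : Int :=
  if S = E then 0
  else
    -- line.pop(-1): drop the trailing sentinel (exact under Pre_: every line nonempty)
    let stss := lines.map List.dropLast
    pvALoop stss (pvGraph stss) E [((0 : Int), S)] [S] []

-- ===== PORT B =====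
-- next frontier: all not-yet-visited lines sharing a station with the current frontier
def pvNF (stss : List (List Int)) (visited frontier : List Nat) : List Nat :=
  let sts := frontier.flatMap (fun i => stss.getD i [])
  (List.range stss.length).filter
    (fun i => decide (i ∉ visited) && (stss.getD i []).any (fun v => decide (v ∈ sts)))

-- the 'while frontier:' loop of Source B (level-synchronous line BFS)
def pvBLoop (stss : List (List Int)) (E : Int) (visited frontier : List Nat) (k : Int) : Int :=
  if frontier.any (fun i => decide (E ∈ stss.getD i [])) then k
  else
    let nf := pvNF stss visited frontier
    if h : nf = [] then -1
    else pvBLoop stss E (visited ++ nf) nf (k + 1)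
termination_by ((List.range stss.length).filter (fun i => decide (i ∉ visited))).length
decreasing_by
  rcases List.exists_mem_of_ne_nil _ h with ⟨i, hi⟩
  have hi2 : i ∈ pvNF stss visited frontier := hi
  simp only [pvNF, List.mem_filter, List.mem_range, Bool.and_eq_true, decide_eq_true_eq] at hi2
  refine pv_filter_lt _ _ _ ?_ i (List.mem_range.2 hi2.1) (by simpa using hi2.2.1) ?_
  · intro x _ hx
    simp only [decide_eq_true_eq, List.mem_append] at *
    intro hmem; exact hx (Or.inl hmem)
  · simp only [decide_eq_false_iff_not, not_not, List.mem_append]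
    exact Or.inr hi

def solution_alt (N : Int) (L : Int) (lines : List (List Int)) (S : Int) (E : Int) : Int :=
  if S = E then 0
  else
    let stss := lines.map List.dropLast   -- line.pop(-1), as in Source B
    let f0 := (List.range stss.length).filter (fun i => decide (S ∈ stss.getD i []))
    if f0 = [] then -1 else pvBLoop stss E f0 f0 0

-- ===== PRECONDITION & SPEC =====
-- Pre_ admits the inputs on which Python A provably returns the literal-station BFS value:
-- it excludes inputs where A raises (negative N, an empty line, an expandable line id ≥ L,
-- a station or S above N or below -(N+1)) and — restricting to the task's natural domain —
-- inputs with stations or S below 0, where A returns a value only by Python's accidental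
-- negative-index wraparound conflating station -t with station N+1-t; the single value -1 IS
-- admitted when no station uses N (there the wrap is an exact relabelling), as are
-- station-free inputs with any in-bounds S.
def Pre_solution (N : Int) (L : Int) (lines : List (List Int)) (S : Int) (E : Int) : Prop :=
  S = E ∨ (0 ≤ N ∧ (∀ l ∈ lines, l ≠ []) ∧
    ((-(N + 1) ≤ S ∧ S ≤ N ∧ ∀ l ∈ lines, l.dropLast = []) ∨
     ((∀ p ∈ lines.zipIdx, p.1.dropLast ≠ [] → (p.2 : Int) < L) ∧
      ((0 ≤ S ∧ S ≤ N ∧ ∀ l ∈ lines, ∀ v ∈ l.dropLast, 0 ≤ v ∧ v ≤ N) ∨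
       ((S = -1 ∨ (0 ≤ S ∧ S ≤ N - 1)) ∧
        ∀ l ∈ lines, ∀ v ∈ l.dropLast, v = -1 ∨ (0 ≤ v ∧ v ≤ N - 1))))))

instance (N : Int) (L : Int) (lines : List (List Int)) (S : Int) (E : Int) :
    Decidable (Pre_solution N L lines S E) := by unfold Pre_solution; infer_instance

def pvWitness_solution : Int × Int × List (List Int) × Int × Int :=
  (3, 2, [[1, 2, -1], [2, 3, -1]], 1, 3)

def Spec_solution (N : Int) (L : Int) (lines : List (List Int)) (S : Int) (E : Int) (out : Int) : Prop := out = solution_alt N L lines S E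
instance (N : Int) (L : Int) (lines : List (List Int)) (S : Int) (E : Int) (out : Int) : Decidable (Spec_solution N L lines S E out) := by unfold Spec_solution; infer_instance

-- ===== CLAIM (what is proved, stated in full; the proofs are below) =====
def Claim_equal_solution : Prop := ∀ (N : Int) (L : Int) (lines : List (List Int)) (S : Int) (E : Int), Dom_solution N L lines S E → Pre_solution N L lines S E → Spec_solution N L lines S E (solution N L lines S E)

-- ===== LEMMAS AND PROOFS =====

-- abbreviations (proof layer only)
def pvSts (stss : List (List Int)) (i : Nat) : List Int := stss.getD i []
def pvStA (stss : List (List Int)) (ls : List Nat) : List Int := ls.flatMap (pvSts stss)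

-- the canonical level sets of the line-BFS: (visited lines, frontier) after k levels
def pvVF (stss : List (List Int)) (S : Int) : Nat → List Nat × List Nat
  | 0 => ((List.range stss.length).filter (fun i => decide (S ∈ stss.getD i [])),
          (List.range stss.length).filter (fun i => decide (S ∈ stss.getD i [])))
  | k + 1 =>
    let p := pvVF stss S k
    (p.1 ++ pvNF stss p.1 p.2, pvNF stss p.1 p.2)

def pvVis (stss : List (List Int)) (S : Int) (k : Nat) : List Nat := (pvVF stss S k).1
def pvFr (stss : List (List Int)) (S : Int) (k : Nat) : List Nat := (pvVF stss S k).2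
def pvVp (stss : List (List Int)) (S : Int) : Nat → List Nat
  | 0 => []
  | k + 1 => pvVis stss S k
def pvSVp (stss : List (List Int)) (S : Int) (k : Nat) : List Int :=
  S :: pvStA stss (pvVp stss S k)

-- the invariant tying A's mid-phase state to the level sets
def pvInv (stss : List (List Int)) (S E : Int) (k : Nat)
    (A1 A2 visit : List Int) (lv : List Nat) : Prop :=
  (∀ w, w ∈ visit ↔ w = S ∨ ∃ i ∈ lv, w ∈ pvSts stss i) ∧
  (∀ i ∈ pvVp stss S k, i ∈ lv) ∧
  (∀ i ∈ lv, i ∈ pvVis stss S k) ∧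
  (∀ i ∈ lv, E ∉ pvSts stss i) ∧
  (∀ v ∈ A1, v ∈ visit ∧ v ∈ pvSVp stss S k) ∧
  (∀ v ∈ A2, v ∈ visit ∧ v ∉ pvSVp stss S k) ∧
  (∀ w ∈ visit, w ∈ A1 ∨ w ∈ A2 ∨ ∀ i, i < stss.length → w ∈ pvSts stss i → i ∈ lv)

theorem pvGraphInner_mem (idx : Nat) (l : List Int) :
    ∀ (g : Int → List Nat) (v : Int) (j : Nat),
    j ∈ (l.foldl (fun g' x => fun w => if w = x then g' w ++ [idx] else g' w) g) v ↔
      j ∈ g v ∨ (j = idx ∧ v ∈ l) := by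
  induction l with
  | nil => simp
  | cons x xs ih =>
    intro g v j
    rw [List.foldl_cons, ih]
    by_cases hvx : v = x
    · subst hvx; simp; try tauto
    · simp [hvx]; try tauto

theorem pvGraphFold_mem (ps : List (List Int × Nat)) :
    ∀ (g0 : Int → List Nat) (v : Int) (j : Nat),
    j ∈ (ps.foldl
        (fun g p => p.1.foldl (fun g' x => fun w => if w = x then g' w ++ [p.2] else g' w) g)
        g0) v ↔
      j ∈ g0 v ∨ ∃ p ∈ ps, p.2 = j ∧ v ∈ p.1 := by
  induction ps with
  | nil => simp
  | cons p ps ih =>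
    intro g0 v j
    rw [List.foldl_cons, ih, pvGraphInner_mem]
    simp only [List.mem_cons]
    constructor
    · rintro ((hg | ⟨rfl, hv⟩) | ⟨q, hq, hqj, hvq⟩)
      · exact Or.inl hg
      · exact Or.inr ⟨p, Or.inl rfl, rfl, hv⟩
      · exact Or.inr ⟨q, Or.inr hq, hqj, hvq⟩
    · rintro (hg | ⟨q, (rfl | hq), hqj, hvq⟩)
      · exact Or.inl (Or.inl hg)
      · exact Or.inl (Or.inr ⟨hqj.symm, hvq⟩)
      · exact Or.inr ⟨q, hq, hqj, hvq⟩

theorem pvGraph_mem (stss : List (List Int)) (v : Int) (j : Nat) :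
    j ∈ pvGraph stss v ↔ j < stss.length ∧ v ∈ pvSts stss j := by
  rw [pvGraph, pvGraphFold_mem]
  simp only [List.not_mem_nil, false_or]
  constructor
  · rintro ⟨p, hp, rfl, hv⟩
    rw [List.mem_zipIdx_iff_getElem?] at hp
    rcases List.getElem?_eq_some_iff.1 hp with ⟨hlt, hget⟩
    exact ⟨hlt, by rwa [pvSts, List.getD_eq_getElem stss [] hlt, hget]⟩
  · rintro ⟨hlt, hv⟩
    refine ⟨(stss[j], j), ?_, rfl, ?_⟩
    · rw [List.mem_zipIdx_iff_getElem?]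
      exact List.getElem?_eq_some_iff.2 ⟨hlt, rfl⟩
    · rwa [pvSts, List.getD_eq_getElem stss [] hlt] at hv

theorem pvNF_mem (stss : List (List Int)) (visited frontier : List Nat) (i : Nat) :
    i ∈ pvNF stss visited frontier ↔
      i < stss.length ∧ i ∉ visited ∧
        ∃ w, w ∈ pvSts stss i ∧ ∃ j ∈ frontier, w ∈ pvSts stss j := by
  simp only [pvNF, List.mem_filter, List.mem_range, Bool.and_eq_true, decide_eq_true_eq,
    List.any_eq_true, List.mem_flatMap, pvSts]

theorem pvVis_succ (stss : List (List Int)) (S : Int) (k : Nat) :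
    pvVis stss S (k + 1) = pvVis stss S k ++ pvFr stss S (k + 1) := rfl

theorem pvFr_succ (stss : List (List Int)) (S : Int) (k : Nat) :
    pvFr stss S (k + 1) = pvNF stss (pvVis stss S k) (pvFr stss S k) := rfl

theorem pvVis_zero_mem (stss : List (List Int)) (S : Int) (i : Nat) :
    i ∈ pvVis stss S 0 ↔ i < stss.length ∧ S ∈ pvSts stss i := by
  simp [pvVis, pvVF, pvSts, List.mem_filter]

theorem pvVisEq (stss : List (List Int)) (S : Int) (k : Nat) :
    pvVis stss S k = pvVp stss S k ++ pvFr stss S k := by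
  cases k with
  | zero => rfl
  | succ k => rfl

theorem pvVis_mono_succ (stss : List (List Int)) (S : Int) (k : Nat) {i : Nat}
    (h : i ∈ pvVis stss S k) : i ∈ pvVis stss S (k + 1) := by
  rw [pvVis_succ]; exact List.mem_append_left _ h

theorem pvFr_sub_vis (stss : List (List Int)) (S : Int) (k : Nat) {i : Nat}
    (h : i ∈ pvFr stss S k) : i ∈ pvVis stss S k := by
  rw [pvVisEq]; exact List.mem_append_right _ h

theorem pvVis_lt_length (stss : List (List Int)) (S : Int) (k : Nat) {i : Nat}
    (h : i ∈ pvVis stss S k) : i < stss.length := by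
  induction k with
  | zero => exact ((pvVis_zero_mem stss S i).1 h).1
  | succ k ih =>
    rw [pvVis_succ] at h
    rcases List.mem_append.1 h with h | h
    · exact ih h
    · exact ((pvNF_mem stss _ _ i).1 h).1

theorem pvFrEq (stss : List (List Int)) (S : Int) (k : Nat) {i : Nat}
    (h1 : i ∈ pvVis stss S k) (h2 : i ∉ pvVp stss S k) : i ∈ pvFr stss S k := by
  rw [pvVisEq] at h1
  rcases List.mem_append.1 h1 with h | h
  · exact absurd h h2
  · exact h

theorem pvAdjSV (stss : List (List Int)) (S : Int) (k : Nat) (v : Int) (i : Nat)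
    (hv : v = S ∨ ∃ j ∈ pvVis stss S k, v ∈ pvSts stss j)
    (hi : i < stss.length) (hvi : v ∈ pvSts stss i) : i ∈ pvVis stss S (k + 1) := by
  induction k with
  | zero =>
    rcases hv with rfl | ⟨j, hj, hvj⟩
    · exact pvVis_mono_succ _ _ _ ((pvVis_zero_mem stss v i).2 ⟨hi, hvi⟩)
    · by_cases hIn : i ∈ pvVis stss S 0
      · exact pvVis_mono_succ _ _ _ hIn
      · rw [pvVis_succ]
        refine List.mem_append_right _ ?_
        rw [pvFr_succ, pvNF_mem]
        exact ⟨hi, hIn, v, hvi, j, hj, hvj⟩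
  | succ k ih =>
    rcases hv with rfl | ⟨j, hj, hvj⟩
    · exact pvVis_mono_succ _ _ _ (ih (Or.inl rfl))
    · rw [pvVis_succ] at hj
      rcases List.mem_append.1 hj with hj | hj
      · exact pvVis_mono_succ _ _ _ (ih (Or.inr ⟨j, hj, hvj⟩))
      · by_cases hIn : i ∈ pvVis stss S (k + 1)
        · exact pvVis_mono_succ _ _ _ hIn
        · rw [pvVis_succ (k := k + 1)]
          refine List.mem_append_right _ ?_
          rw [pvFr_succ, pvNF_mem]
          exact ⟨hi, hIn, v, hvi, j, hj, hvj⟩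

theorem pvAdjSVp (stss : List (List Int)) (S : Int) (k : Nat) (v : Int) (i : Nat)
    (hv : v ∈ pvSVp stss S k) (hi : i < stss.length) (hvi : v ∈ pvSts stss i) :
    i ∈ pvVis stss S k := by
  cases k with
  | zero =>
    have hvS : v = S := by simpa [pvSVp, pvVp, pvStA] using hv
    exact (pvVis_zero_mem stss S i).2 ⟨hi, hvS ▸ hvi⟩
  | succ k =>
    rcases List.mem_cons.1 hv with hvS | hv
    · exact pvAdjSV stss S k v i (Or.inl hvS) hi hvi
    · rcases List.mem_flatMap.1 hv with ⟨j, hj, hvj⟩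
      exact pvAdjSV stss S k v i (Or.inr ⟨j, hj, hvj⟩) hi hvi

theorem pvFrAdj (stss : List (List Int)) (S : Int) (k : Nat) (i : Nat)
    (h : i ∈ pvFr stss S k) : ∃ w ∈ pvSVp stss S k, w ∈ pvSts stss i := by
  cases k with
  | zero =>
    have h' : i ∈ pvVis stss S 0 := h
    exact ⟨S, by simp [pvSVp, pvVp, pvStA], ((pvVis_zero_mem stss S i).1 h').2⟩
  | succ k =>
    rw [pvFr_succ, pvNF_mem] at h
    rcases h with ⟨_, _, w, hwi, j, hj, hwj⟩
    refine ⟨w, ?_, hwi⟩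
    exact List.mem_cons_of_mem _ (List.mem_flatMap.2 ⟨j, pvFr_sub_vis stss S k hj, hwj⟩)

theorem pvBLoop_nil (stss : List (List Int)) (E : Int) (visited : List Nat) (k : Int) :
    pvBLoop stss E visited [] k = -1 := by
  rw [pvBLoop]
  simp [pvNF]

theorem pvBLoop_step (stss : List (List Int)) (S E : Int) (k : Nat) (c : Int)
    (hFrE : ∀ i ∈ pvFr stss S k, E ∉ pvSts stss i) :
    pvBLoop stss E (pvVis stss S k) (pvFr stss S k) c =
      pvBLoop stss E (pvVis stss S (k + 1)) (pvFr stss S (k + 1)) (c + 1) := by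
  rw [pvBLoop]
  have hany : ((pvFr stss S k).any (fun i => decide (E ∈ stss.getD i []))) = false := by
    rw [List.any_eq_false]
    intro i hi
    simpa using hFrE i hi
  rw [if_neg (by simp only [hany]; exact Bool.false_ne_true)]
  by_cases hnf : pvNF stss (pvVis stss S k) (pvFr stss S k) = []
  · rw [dif_pos hnf]
    rw [pvFr_succ, hnf, pvBLoop_nil]
  · rw [dif_neg hnf]
    rfl

theorem pvExpand_found (E c : Int) :
    ∀ (line : List Int) (dq : List (Int × Int)) (visit : List Int),
    E ∉ visit → E ∈ line → (pvExpand E c line dq visit).1 = some c := by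
  intro line
  induction line with
  | nil => intro dq visit _ hE; simp at hE
  | cons v rest ih =>
    intro dq visit hEv hEl
    by_cases hv : v ∈ visit
    · have hvE : v ≠ E := fun h => hEv (h ▸ hv)
      have hErest : E ∈ rest := by
        rcases List.mem_cons.1 hEl with h | h
        · exact absurd h.symm hvE
        · exact h
      simpa [pvExpand, hv] using ih dq visit hEv hErest
    · by_cases hvE : v = E
      · subst hvE; simp [pvExpand, hv]
      · have hErest : E ∈ rest := by
          rcases List.mem_cons.1 hEl with h | h
          · exact absurd h.symm hvE
          · exact h
        have hEv' : E ∉ v :: visit := by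
          simp only [List.mem_cons, not_or]
          exact ⟨fun h => hvE h.symm, hEv⟩
        simpa [pvExpand, hv, hvE] using ih (dq ++ [(c + 1, v)]) (v :: visit) hEv' hErest

theorem pvExpand_none (E c : Int) :
    ∀ (line : List Int) (dq : List (Int × Int)) (visit : List Int),
    E ∉ line → ∃ (app : List Int) (visit' : List Int),
      pvExpand E c line dq visit = (none, dq ++ app.map (fun w => (c + 1, w)), visit') ∧
      (∀ w ∈ app, w ∈ line ∧ w ∉ visit) ∧
      (∀ w, w ∈ visit' ↔ w ∈ visit ∨ w ∈ line) ∧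
      (∀ w, w ∈ visit' → w ∈ visit ∨ w ∈ app) := by
  intro line
  induction line with
  | nil =>
    intro dq visit _
    exact ⟨[], visit, by simp [pvExpand], by simp, by simp, by simp⟩
  | cons v rest ih =>
    intro dq visit hE
    have hvE : v ≠ E := fun h => hE (by simp [h])
    have hErest : E ∉ rest := fun h => hE (by simp [h])
    by_cases hv : v ∈ visit
    · obtain ⟨app, visit', heq, hmem, hiff, hcov⟩ := ih dq visit hErest
      refine ⟨app, visit', by simpa [pvExpand, hv] using heq, ?_, ?_, ?_⟩
      · exact fun w hw => ⟨List.mem_cons_of_mem _ (hmem w hw).1, (hmem w hw).2⟩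
      · intro w
        rw [hiff w]
        simp only [List.mem_cons]
        constructor
        · rintro (h | h)
          · exact Or.inl h
          · exact Or.inr (Or.inr h)
        · rintro (h | rfl | h)
          · exact Or.inl h
          · exact Or.inl hv
          · exact Or.inr h
      · exact hcov
    · obtain ⟨app, visit', heq, hmem, hiff, hcov⟩ := ih (dq ++ [(c + 1, v)]) (v :: visit) hErest
      have hne : ¬ (v = E) := hvE
      refine ⟨v :: app, visit', ?_, ?_, ?_, ?_⟩
      · rw [show pvExpand E c (v :: rest) dq visit
              = pvExpand E c rest (dq ++ [(c + 1, v)]) (v :: visit) from by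
            simp [pvExpand, hv, hne], heq]
        simp
      · intro w hw
        rcases List.mem_cons.1 hw with rfl | hw
        · exact ⟨List.mem_cons_self, hv⟩
        · exact ⟨List.mem_cons_of_mem _ (hmem w hw).1,
            fun hwv => (hmem w hw).2 (List.mem_cons_of_mem _ hwv)⟩
      · intro w
        rw [hiff w]
        simp only [List.mem_cons]
        tauto
      · intro w hw
        rcases hcov w hw with h | h
        · rcases List.mem_cons.1 h with rfl | h
          · exact Or.inr List.mem_cons_self
          · exact Or.inl h
        · exact Or.inr (List.mem_cons_of_mem _ h)

theorem pvProcess_found (stss : List (List Int)) (E c : Int) :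
    ∀ (ids : List Nat) (dq : List (Int × Int)) (visit : List Int) (lv : List Nat),
    E ∉ visit → (∃ i ∈ ids, i ∉ lv ∧ E ∈ pvSts stss i) →
    (pvProcess stss E c ids dq visit lv).1 = some c := by
  intro ids
  induction ids with
  | nil => rintro dq visit lv _ ⟨i, hi, _⟩; simp at hi
  | cons i rest ih =>
    rintro dq visit lv hEv ⟨i', hi', hi'lv, hi'E⟩
    by_cases hi : i ∈ lv
    · have hrest : i' ∈ rest := by
        rcases List.mem_cons.1 hi' with rfl | h
        · exact absurd hi hi'lv
        · exact h
      simpa [pvProcess, hi] using ih dq visit lv hEv ⟨i', hrest, hi'lv, hi'E⟩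
    · by_cases hiE : E ∈ pvSts stss i
      · have hfound := pvExpand_found E c (stss.getD i []) dq visit hEv hiE
        simp only [pvProcess, if_neg hi]
        rcases hres : pvExpand E c (stss.getD i []) dq visit with ⟨o, dq', visit'⟩
        rw [hres] at hfound
        simp only at hfound
        subst hfound
        simp
      · obtain ⟨app, visit', heq, hmem, hiff, _⟩ :=
          pvExpand_none E c (stss.getD i []) dq visit hiE
        have hEv' : E ∉ visit' := by
          rw [hiff E]
          rintro (h | h)
          · exact hEv h
          · exact hiE h
        have hrest : i' ∈ rest := by
          rcases List.mem_cons.1 hi' with rfl | h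
          · exact absurd hi'E hiE
          · exact h
        have hi'lv' : i' ∉ i :: lv := by
          simp only [List.mem_cons, not_or]
          exact ⟨fun h => hiE (h ▸ hi'E), hi'lv⟩
        simp only [pvProcess, if_neg hi, heq]
        exact ih (dq ++ app.map fun w => (c + 1, w)) visit' (i :: lv) hEv'
          ⟨i', hrest, hi'lv', hi'E⟩

theorem pvProcess_none (stss : List (List Int)) (E c : Int) :
    ∀ (ids : List Nat) (dq : List (Int × Int)) (visit : List Int) (lv : List Nat),
    (∀ i ∈ ids, i ∈ lv ∨ E ∉ pvSts stss i) →
    ∃ (app : List Int) (visit' : List Int) (lv' : List Nat),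
      pvProcess stss E c ids dq visit lv =
        (none, dq ++ app.map (fun w => (c + 1, w)), visit', lv') ∧
      (∀ w ∈ app, w ∉ visit ∧ ∃ i ∈ ids, i ∉ lv ∧ w ∈ pvSts stss i) ∧
      (∀ w, w ∈ visit' ↔ w ∈ visit ∨ ∃ i ∈ ids, i ∉ lv ∧ w ∈ pvSts stss i) ∧
      (∀ w, w ∈ visit' → w ∈ visit ∨ w ∈ app) ∧
      (∀ j, j ∈ lv' ↔ j ∈ lv ∨ j ∈ ids) := by
  intro ids
  induction ids with
  | nil =>
    intro dq visit lv _
    exact ⟨[], visit, lv, by simp [pvProcess], by simp, by simp, by simp, by simp⟩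
  | cons i rest ih =>
    intro dq visit lv hno
    have hno' : ∀ i' ∈ rest, i' ∈ i :: lv ∨ E ∉ pvSts stss i' := by
      intro i' h
      rcases hno i' (List.mem_cons_of_mem _ h) with h' | h'
      · exact Or.inl (List.mem_cons_of_mem _ h')
      · exact Or.inr h'
    by_cases hi : i ∈ lv
    · have hnor : ∀ i' ∈ rest, i' ∈ lv ∨ E ∉ pvSts stss i' :=
        fun i' h => hno i' (List.mem_cons_of_mem _ h)
      obtain ⟨app, visit', lv', heq, h1, h2, h3, h4⟩ := ih dq visit lv hnor
      refine ⟨app, visit', lv', by simpa [pvProcess, hi] using heq, ?_, ?_, h3, ?_⟩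
      · intro w hw
        obtain ⟨hnv, i', hi', hlv', hsts⟩ := h1 w hw
        exact ⟨hnv, i', List.mem_cons_of_mem _ hi', hlv', hsts⟩
      · intro w
        rw [h2 w]
        constructor
        · rintro (h | ⟨i', hi', hlv', hsts⟩)
          · exact Or.inl h
          · exact Or.inr ⟨i', List.mem_cons_of_mem _ hi', hlv', hsts⟩
        · rintro (h | ⟨i', hi', hlv', hsts⟩)
          · exact Or.inl h
          · rcases List.mem_cons.1 hi' with rfl | hmem
            · exact absurd hi hlv'
            · exact Or.inr ⟨i', hmem, hlv', hsts⟩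
      · intro j
        rw [h4 j]
        simp only [List.mem_cons]
        constructor
        · rintro (h | h)
          · exact Or.inl h
          · exact Or.inr (Or.inr h)
        · rintro (h | rfl | h)
          · exact Or.inl h
          · exact Or.inl hi
          · exact Or.inr h
    · have hiE : E ∉ pvSts stss i := by
        rcases hno i List.mem_cons_self with h | h
        · exact absurd h hi
        · exact h
      obtain ⟨app1, vmid, heq1, hm1, hif1, hcov1⟩ :=
        pvExpand_none E c (stss.getD i []) dq visit hiE
      obtain ⟨app2, visit', lv', heq2, h1, h2, h3, h4⟩ :=
        ih (dq ++ app1.map fun w => (c + 1, w)) vmid (i :: lv) hno'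
      refine ⟨app1 ++ app2, visit', lv', ?_, ?_, ?_, ?_, ?_⟩
      · simp only [pvProcess, if_neg hi, heq1, heq2, List.map_append, List.append_assoc]
      · intro w hw
        rcases List.mem_append.1 hw with hw | hw
        · exact ⟨(hm1 w hw).2, i, List.mem_cons_self, hi, (hm1 w hw).1⟩
        · obtain ⟨hnv, i', hi', hlv', hsts⟩ := h1 w hw
          refine ⟨fun h => hnv ((hif1 w).2 (Or.inl h)), i', List.mem_cons_of_mem _ hi',
            fun h => hlv' (List.mem_cons_of_mem _ h), hsts⟩
      · intro w
        rw [h2 w]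
        constructor
        · rintro (h | ⟨i', hi', hlv', hsts⟩)
          · rcases (hif1 w).1 h with h' | h'
            · exact Or.inl h'
            · exact Or.inr ⟨i, List.mem_cons_self, hi, h'⟩
          · have : i' ∉ lv := fun h' => hlv' (List.mem_cons_of_mem _ h')
            exact Or.inr ⟨i', List.mem_cons_of_mem _ hi', this, hsts⟩
        · rintro (h | ⟨i', hi', hlv', hsts⟩)
          · exact Or.inl ((hif1 w).2 (Or.inl h))
          · rcases List.mem_cons.1 hi' with rfl | hmem
            · exact Or.inl ((hif1 w).2 (Or.inr hsts))
            · by_cases hii : i' = i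
              · subst hii
                exact Or.inl ((hif1 w).2 (Or.inr hsts))
              · refine Or.inr ⟨i', hmem, ?_, hsts⟩
                simp only [List.mem_cons, not_or]
                exact ⟨hii, hlv'⟩
      · intro w hw
        rcases h3 w hw with h | h
        · rcases hcov1 w h with h' | h'
          · exact Or.inl h'
          · exact Or.inr (List.mem_append_left _ h')
        · exact Or.inr (List.mem_append_right _ h)
      · intro j
        rw [h4 j]
        simp only [List.mem_cons]
        tauto

theorem pvSVp_sub_visit (stss : List (List Int)) (S E : Int) (k : Nat)
    (A1 A2 visit : List Int) (lv : List Nat)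
    (hInv : pvInv stss S E k A1 A2 visit lv) : ∀ v ∈ pvSVp stss S k, v ∈ visit := by
  obtain ⟨hv, hlv1, -, -, -, -, -⟩ := hInv
  intro u hu
  rcases List.mem_cons.1 hu with rfl | hu
  · exact (hv u).2 (Or.inl rfl)
  · rcases List.mem_flatMap.1 hu with ⟨i, hi, hui⟩
    exact (hv u).2 (Or.inr ⟨i, hlv1 i hi, hui⟩)

theorem pvFrLv (stss : List (List Int)) (S E : Int) (k : Nat)
    (A2 visit : List Int) (lv : List Nat)
    (hInv : pvInv stss S E k [] A2 visit lv) : ∀ i ∈ pvFr stss S k, i ∈ lv := by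
  intro i hi
  obtain ⟨w, hwSV, hwi⟩ := pvFrAdj stss S k i hi
  have hwv : w ∈ visit := pvSVp_sub_visit stss S E k [] A2 visit lv hInv w hwSV
  obtain ⟨-, -, -, -, -, hA2, hdone⟩ := hInv
  rcases hdone w hwv with h | h | h
  · simp at h
  · exact absurd hwSV (hA2 w h).2
  · exact h i (pvVis_lt_length stss S k (pvFr_sub_vis stss S k hi)) hwi

theorem pvShift (stss : List (List Int)) (S E : Int) (k : Nat)
    (A2 visit : List Int) (lv : List Nat)
    (hInv : pvInv stss S E k [] A2 visit lv) : pvInv stss S E (k + 1) A2 [] visit lv := by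
  have hFrLv := pvFrLv stss S E k A2 visit lv hInv
  obtain ⟨hv, hlv1, hlv2, hlvE, -, hA2, hdone⟩ := hInv
  have hVisLv : ∀ i ∈ pvVis stss S k, i ∈ lv := by
    intro i hi
    rw [pvVisEq] at hi
    rcases List.mem_append.1 hi with h | h
    · exact hlv1 i h
    · exact hFrLv i h
  refine ⟨hv, ?_, ?_, hlvE, ?_, ?_, ?_⟩
  · intro i hi
    exact hVisLv i hi
  · intro i hi
    exact pvVis_mono_succ _ _ _ (hlv2 i hi)
  · intro w hw
    refine ⟨(hA2 w hw).1, ?_⟩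
    rcases (hv w).1 (hA2 w hw).1 with rfl | ⟨i, hi, hwi⟩
    · exact List.mem_cons_self
    · refine List.mem_cons_of_mem _ (List.mem_flatMap.2 ⟨i, ?_, hwi⟩)
      exact hlv2 i hi
  · intro w hw
    simp at hw
  · intro w hw
    rcases hdone w hw with h | h | h
    · simp at h
    · exact Or.inl h
    · exact Or.inr (Or.inr h)

theorem pvBase (stss : List (List Int)) (S E : Int) (k : Nat) (c : Int)
    (visit : List Int) (lv : List Nat)
    (hInv : pvInv stss S E k [] [] visit lv) :
    pvBLoop stss E (pvVis stss S k) (pvFr stss S k) c = -1 := by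
  have hFrLv := pvFrLv stss S E k [] visit lv hInv
  obtain ⟨hv, hlv1, hlv2, hlvE, -, -, hdone⟩ := hInv
  rw [pvBLoop]
  have hany : ((pvFr stss S k).any (fun i => decide (E ∈ stss.getD i []))) = false := by
    rw [List.any_eq_false]
    intro i hi
    simpa using hlvE i (hFrLv i hi)
  rw [if_neg (by simp only [hany]; exact Bool.false_ne_true)]
  have hnf : pvNF stss (pvVis stss S k) (pvFr stss S k) = [] := by
    rw [List.eq_nil_iff_forall_not_mem]
    intro i hi
    rw [pvNF_mem] at hi
    obtain ⟨hlen, hnv, w, hwi, j, hjF, hwj⟩ := hi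
    have hwv : w ∈ visit := (hv w).2 (Or.inr ⟨j, hFrLv j hjF, hwj⟩)
    rcases hdone w hwv with h | h | h
    · simp at h
    · simp at h
    · exact hnv (hlv2 i (h i hlen hwi))
  rw [dif_pos hnf]

theorem pvStep (stss : List (List Int)) (S E : Int) (hSE : S ≠ E) (n k : Nat) (v : Int)
    (A1 A2 visit : List Int) (lv : List Nat)
    (hInv : pvInv stss S E k (v :: A1) A2 visit lv)
    (hm : (v :: A1).length + A2.length + pvCnt stss visit ≤ n + 1)
    (IH : ∀ (k' : Nat) (A1' A2' visit' : List Int) (lv' : List Nat),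
      A1'.length + A2'.length + pvCnt stss visit' ≤ n →
      pvInv stss S E k' A1' A2' visit' lv' →
      pvALoop stss (pvGraph stss) E
          (A1'.map (fun w => ((k' : Int), w)) ++ A2'.map (fun w => ((k' : Int) + 1, w)))
          visit' lv' =
        pvBLoop stss E (pvVis stss S k') (pvFr stss S k') (k' : Int)) :
    pvALoop stss (pvGraph stss) E
        ((v :: A1).map (fun w => ((k : Int), w)) ++ A2.map (fun w => ((k : Int) + 1, w)))
        visit lv =
      pvBLoop stss E (pvVis stss S k) (pvFr stss S k) (k : Int) := by
  obtain ⟨hv, hlv1, hlv2, hlvE, hA1, hA2, hdone⟩ := hInv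
  have hEv : E ∉ visit := by
    intro hEv
    rcases (hv E).1 hEv with hES | ⟨i, hi, hEi⟩
    · exact hSE hES.symm
    · exact hlvE i hi hEi
  have hvSVp : v ∈ pvSVp stss S k := (hA1 v List.mem_cons_self).2
  simp only [List.map_cons, List.cons_append]
  rw [pvALoop]
  by_cases hEx : ∃ i ∈ pvGraph stss v, i ∉ lv ∧ E ∈ pvSts stss i
  · -- a fresh line through v contains E: A returns k, and B's level-k frontier has that line
    have hfound := pvProcess_found stss E (k : Int) (pvGraph stss v)
      (A1.map (fun w => ((k : Int), w)) ++ A2.map (fun w => ((k : Int) + 1, w))) visit lv hEv hEx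
    obtain ⟨i, hig, hilv, hiE⟩ := hEx
    obtain ⟨hilen, hvsts⟩ := (pvGraph_mem stss v i).1 hig
    have hiVis : i ∈ pvVis stss S k := pvAdjSVp stss S k v i hvSVp hilen hvsts
    have hiFr : i ∈ pvFr stss S k :=
      pvFrEq stss S k hiVis (fun h => hilv (hlv1 i h))
    have hBret : pvBLoop stss E (pvVis stss S k) (pvFr stss S k) (k : Int) = (k : Int) := by
      rw [pvBLoop, if_pos]
      rw [List.any_eq_true]
      exact ⟨i, hiFr, by simpa [pvSts] using hiE⟩
    rw [hBret]
    split
    · next r d' vi' l' hres =>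
      rw [hres] at hfound
      simpa using hfound
    · next d' vi' l' hres =>
      rw [hres] at hfound
      simp at hfound
  · -- no fresh line through v contains E: one more station is processed, invariant maintained
    push_neg at hEx
    have hno : ∀ i ∈ pvGraph stss v, i ∈ lv ∨ E ∉ pvSts stss i := by
      intro i h
      by_cases hl : i ∈ lv
      · exact Or.inl hl
      · exact Or.inr (hEx i h hl)
    obtain ⟨app, vi', l', heq, hm1, hif, hcov, hlves⟩ :=
      pvProcess_none stss E (k : Int) (pvGraph stss v)
        (A1.map (fun w => ((k : Int), w)) ++ A2.map (fun w => ((k : Int) + 1, w))) visit lv hno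
    have hSVv : ∀ u ∈ pvSVp stss S k, u ∈ visit := by
      intro u hu
      rcases List.mem_cons.1 hu with rfl | hu
      · exact (hv u).2 (Or.inl rfl)
      · rcases List.mem_flatMap.1 hu with ⟨i, hi, hui⟩
        exact (hv u).2 (Or.inr ⟨i, hlv1 i hi, hui⟩)
    split
    · next r d' vi'' l'' hres =>
      rw [heq] at hres
      simp at hres
    · next d' vi'' l'' hres =>
      rw [heq] at hres
      simp only [Prod.mk.injEq, true_and] at hres
      obtain ⟨hd, hvi, hl⟩ := hres
      subst hd
      subst hvi
      subst hl
      -- measure decreases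
      have hcnt := pvProcess_measure stss E (k : Int) (pvGraph stss v)
        (A1.map (fun w => ((k : Int), w)) ++ A2.map (fun w => ((k : Int) + 1, w))) visit lv
      rw [heq] at hcnt
      simp only [List.length_append, List.length_map] at hcnt
      -- new invariant
      have hInv' : pvInv stss S E k A1 (A2 ++ app) vi' l' := by
        refine ⟨?_, ?_, ?_, ?_, ?_, ?_, ?_⟩
        · intro w
          rw [hif w]
          constructor
          · rintro (h | ⟨i, hids, hilv, hw⟩)
            · rcases (hv w).1 h with rfl | ⟨i, hi, hwi⟩
              · exact Or.inl rfl
              · exact Or.inr ⟨i, (hlves i).2 (Or.inl hi), hwi⟩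
            · exact Or.inr ⟨i, (hlves i).2 (Or.inr hids), hw⟩
          · rintro (rfl | ⟨i, hi, hw⟩)
            · exact Or.inl ((hv w).2 (Or.inl rfl))
            · rcases (hlves i).1 hi with hl | hids
              · exact Or.inl ((hv w).2 (Or.inr ⟨i, hl, hw⟩))
              · by_cases hl : i ∈ lv
                · exact Or.inl ((hv w).2 (Or.inr ⟨i, hl, hw⟩))
                · exact Or.inr ⟨i, hids, hl, hw⟩
        · intro i hi
          exact (hlves i).2 (Or.inl (hlv1 i hi))
        · intro i hi
          rcases (hlves i).1 hi with h | h
          · exact hlv2 i h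
          · obtain ⟨hilen, hvsts⟩ := (pvGraph_mem stss v i).1 h
            exact pvAdjSVp stss S k v i hvSVp hilen hvsts
        · intro i hi
          rcases (hlves i).1 hi with h | h
          · exact hlvE i h
          · by_cases hl : i ∈ lv
            · exact hlvE i hl
            · exact hEx i h hl
        · intro w hw
          have h := hA1 w (List.mem_cons_of_mem _ hw)
          exact ⟨(hif w).2 (Or.inl h.1), h.2⟩
        · intro w hw
          rcases List.mem_append.1 hw with hw | hw
          · have h := hA2 w hw
            exact ⟨(hif w).2 (Or.inl h.1), h.2⟩
          · obtain ⟨hnv, i, hids, hilv, hsts⟩ := hm1 w hw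
            exact ⟨(hif w).2 (Or.inr ⟨i, hids, hilv, hsts⟩), fun h => hnv (hSVv w h)⟩
        · intro w hw
          rcases hcov w hw with hwv | hwapp
          · rcases hdone w hwv with h | h | h
            · rcases List.mem_cons.1 h with rfl | h
              · refine Or.inr (Or.inr ?_)
                intro i hilen hwi
                exact (hlves i).2 (Or.inr ((pvGraph_mem stss w i).2 ⟨hilen, hwi⟩))
              · exact Or.inl h
            · exact Or.inr (Or.inl (List.mem_append_left _ h))
            · refine Or.inr (Or.inr ?_)
              intro i hilen hwi
              exact (hlves i).2 (Or.inl (h i hilen hwi))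
          · exact Or.inr (Or.inl (List.mem_append_right _ hwapp))
      have hmeas : A1.length + (A2 ++ app).length + pvCnt stss vi' ≤ n := by
        simp only [List.length_append]
        simp only [List.length_cons] at hm
        omega
      have := IH k A1 (A2 ++ app) vi' l' hmeas hInv'
      rw [← this]
      congr 1
      simp [List.map_append, List.append_assoc]

theorem pvMain (stss : List (List Int)) (S E : Int) (hSE : S ≠ E) :
    ∀ (n k : Nat) (A1 A2 visit : List Int) (lv : List Nat),
    A1.length + A2.length + pvCnt stss visit ≤ n →
    pvInv stss S E k A1 A2 visit lv →
    pvALoop stss (pvGraph stss) E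
        (A1.map (fun w => ((k : Int), w)) ++ A2.map (fun w => ((k : Int) + 1, w))) visit lv =
      pvBLoop stss E (pvVis stss S k) (pvFr stss S k) (k : Int) := by
  intro n
  induction n with
  | zero =>
    intro k A1 A2 visit lv hm hInv
    have hA1 : A1 = [] := List.eq_nil_of_length_eq_zero (by omega)
    have hA2 : A2 = [] := List.eq_nil_of_length_eq_zero (by omega)
    subst hA1; subst hA2
    simp only [List.map_nil, List.nil_append]
    rw [pvALoop, pvBase stss S E k (k : Int) visit lv hInv]
  | succ n ih =>
    intro k A1 A2 visit lv hm hInv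
    cases A1 with
    | cons v A1' => exact pvStep stss S E hSE n k v A1' A2 visit lv hInv hm ih
    | nil =>
      cases A2 with
      | nil =>
        simp only [List.map_nil, List.nil_append]
        rw [pvALoop, pvBase stss S E k (k : Int) visit lv hInv]
      | cons v A2' =>
        have hsh := pvShift stss S E k (v :: A2') visit lv hInv
        have hFrE : ∀ i ∈ pvFr stss S k, E ∉ pvSts stss i := by
          intro i hi
          exact hInv.2.2.2.1 i (pvFrLv stss S E k (v :: A2') visit lv hInv i hi)
        rw [pvBLoop_step stss S E k (k : Int) hFrE]
        have hcast : ((k : Int) + 1) = ((k + 1 : Nat) : Int) := by push_cast; ring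
        have hmeas : (v :: A2').length + ([] : List Int).length + pvCnt stss visit ≤ n + 1 := by
          simp only [List.length_cons, List.length_nil] at hm ⊢
          omega
        have := pvStep stss S E hSE n (k + 1) v A2' [] visit lv hsh hmeas ih
        rw [hcast]
        rw [← this]
        congr 1
        simp only [List.map_nil, List.nil_append, List.append_nil]

-- ===== VERDICT (by name: the statement is the Claim_ definition above) =====
theorem solution_spec : Claim_equal_solution := by
  unfold Claim_equal_solution
  intro N L lines S E hDom hPre
  unfold Spec_solution
  by_cases hSE : S = E
  · simp [solution, solution_alt, hSE]
  · simp only [solution, solution_alt, if_neg hSE]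
    have hInv0 : pvInv (lines.map List.dropLast) S E 0 [S] [] [S] [] := by
      refine ⟨?_, ?_, ?_, ?_, ?_, ?_, ?_⟩
      · intro w
        constructor
        · intro h
          exact Or.inl (List.mem_singleton.1 h)
        · rintro (rfl | ⟨i, hi, -⟩)
          · exact List.mem_singleton.2 rfl
          · exact absurd hi (List.not_mem_nil)
      · intro i hi; simp [pvVp] at hi
      · intro i hi; simp at hi
      · intro i hi; simp at hi
      · intro w hw
        simp at hw
        subst hw
        simp [pvSVp, pvVp, pvStA]
      · intro w hw; simp at hw
      · intro w hw
        simp at hw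
        subst hw
        simp
    have hmain := pvMain (lines.map List.dropLast) S E hSE
      (1 + pvCnt (lines.map List.dropLast) [S]) 0 [S] [] [S] [] (by simp) hInv0
    simp only [List.map_cons, List.map_nil, List.append_nil, Nat.cast_zero] at hmain
    rw [hmain]
    by_cases hf0 : (List.range (lines.map List.dropLast).length).filter
        (fun i => decide (S ∈ (lines.map List.dropLast).getD i [])) = []
    · rw [if_pos hf0]
      have hFr0 : pvFr (lines.map List.dropLast) S 0 = [] := hf0
      have hVis0 : pvVis (lines.map List.dropLast) S 0
          = pvVis (lines.map List.dropLast) S 0 := rfl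
      rw [show pvFr (lines.map List.dropLast) S 0
            = ([] : List Nat) from hFr0, pvBLoop_nil]
    · rw [if_neg hf0]
      rfl
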